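-- pv_equiv track=rewrite | github.com/bharathreddyza/tiktok_brainrot | server/utility/video/video_with_messages.py | group_messages_into_thoughts
-- ===== SOURCE A (Python) =====
-- def group_messages_into_thoughts(messages):
--     thoughts = []
--     current_thought = []
--     for (start, end), text in messages:
--         current_thought.append(((start, end), text))
--         if text.strip().endswith(('.', '?', '!')):
--             thoughts.append(current_thought)
--             current_thought = []
--     if current_thought:
--         thoughts.append(current_thought)
--     return thoughts
-- ===== SOURCE B (Python) =====
-- def group_messages_into_thoughts(messages):
--     # Build the groups back-to-front: a sentence-ending item starts a fresh
--     # group; any other item is prepended to the group that follows it.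
--     groups = []
--     for (start, end), text in reversed(messages):
--         item = ((start, end), text)
--         if text.strip().endswith(('.', '?', '!')):
--             groups.insert(0, [item])
--         elif groups:
--             groups[0].insert(0, item)
--         else:
--             groups = [[item]]
--     return groups
-- ===== Notes on version B (the rewrite author's own statement) =====
-- stated objective: alternative
-- what changed: B builds the groups back-to-front in a single reverse pass (a sentence-ending item starts a fresh group, any other item is prepended to the group that follows it), instead of A's forward accumulation of a current_thought buffer flushed at punctuation.
import Mathlib
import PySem

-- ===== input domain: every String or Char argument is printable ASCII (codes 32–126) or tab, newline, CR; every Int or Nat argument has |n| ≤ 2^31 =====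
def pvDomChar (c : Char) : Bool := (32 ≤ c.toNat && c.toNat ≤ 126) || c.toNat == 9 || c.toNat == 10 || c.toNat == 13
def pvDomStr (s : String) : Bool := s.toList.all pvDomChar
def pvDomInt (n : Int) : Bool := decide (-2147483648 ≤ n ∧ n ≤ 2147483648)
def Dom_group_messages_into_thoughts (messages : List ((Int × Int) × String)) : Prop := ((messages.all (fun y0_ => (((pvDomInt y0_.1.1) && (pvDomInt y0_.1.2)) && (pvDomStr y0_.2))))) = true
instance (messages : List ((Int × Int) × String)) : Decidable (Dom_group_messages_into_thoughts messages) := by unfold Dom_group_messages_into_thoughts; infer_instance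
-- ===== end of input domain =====

-- B builds the groups back-to-front in one reverse pass instead of A's forward current-buffer accumulation; same return value (neither mutates its argument).
-- ===== PORT A =====
-- text.strip().endswith(('.', '?', '!'))
def pvEndsPunct (text : String) : Bool :=
  PySem.Str.endswith (PySem.Str.strip text) "." || PySem.Str.endswith (PySem.Str.strip text) "?" || PySem.Str.endswith (PySem.Str.strip text) "!"

-- the for-loop over messages with state (thoughts, current_thought)
def pvLoopA (msgs : List ((Int × Int) × String)) (thoughts : List (List ((Int × Int) × String))) (cur : List ((Int × Int) × String)) : List (List ((Int × Int) × String)) :=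
  match msgs with
  | [] => if cur = [] then thoughts else thoughts ++ [cur]
  | ((s, e), text) :: rest =>
      let cur' := cur ++ [((s, e), text)]
      if pvEndsPunct text then pvLoopA rest (thoughts ++ [cur']) []
      else pvLoopA rest thoughts cur'

def group_messages_into_thoughts (messages : List ((Int × Int) × String)) : List (List ((Int × Int) × String)) :=
  pvLoopA messages [] []

-- ===== PORT B =====
-- the reversed-iteration loop: fold from the right over messages, state = groups so far
def group_messages_into_thoughts_alt (messages : List ((Int × Int) × String)) : List (List ((Int × Int) × String)) :=
  messages.foldr (fun ((s, e), text) groups =>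
    let item := ((s, e), text)
    if pvEndsPunct text then [item] :: groups
    else match groups with
      | [] => [[item]]
      | g :: t => (item :: g) :: t) []

-- ===== PRECONDITION & SPEC =====
def Spec_group_messages_into_thoughts (messages : List ((Int × Int) × String)) (out : List (List ((Int × Int) × String))) : Prop := out = group_messages_into_thoughts_alt messages
instance (messages : List ((Int × Int) × String)) (out : List (List ((Int × Int) × String))) : Decidable (Spec_group_messages_into_thoughts messages out) := by unfold Spec_group_messages_into_thoughts; infer_instance

-- ===== CLAIM (what is proved, stated in full; the proofs are below) =====
def Claim_equal_group_messages_into_thoughts : Prop := ∀ (messages : List ((Int × Int) × String)), Dom_group_messages_into_thoughts messages → Spec_group_messages_into_thoughts messages (group_messages_into_thoughts messages)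

-- ===== LEMMAS AND PROOFS =====

-- cur's items form the prefix of the first group (or a trailing group of their own)
def pvConsInto (cur : List ((Int × Int) × String)) : List (List ((Int × Int) × String)) → List (List ((Int × Int) × String))
  | [] => if cur = [] then [] else [cur]
  | g :: t => (cur ++ g) :: t

theorem pvLoopA_eq (msgs : List ((Int × Int) × String)) :
    ∀ thoughts cur, pvLoopA msgs thoughts cur = thoughts ++ pvConsInto cur (group_messages_into_thoughts_alt msgs) := by
  induction msgs with
  | nil =>
    intro thoughts cur
    simp [pvLoopA, group_messages_into_thoughts_alt, pvConsInto]
    split <;> simp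
  | cons x rest ih =>
    intro thoughts cur
    obtain ⟨⟨s, e⟩, text⟩ := x
    by_cases h : pvEndsPunct text
    · simp only [pvLoopA, group_messages_into_thoughts_alt, List.foldr, h, if_pos, ih]
      cases hg : (group_messages_into_thoughts_alt rest) with
      | nil => simp [group_messages_into_thoughts_alt] at hg; simp [hg, pvConsInto]
      | cons g t => simp [group_messages_into_thoughts_alt] at hg; simp [hg, pvConsInto]
    · simp only [pvLoopA, group_messages_into_thoughts_alt, List.foldr, h, ih,
        Bool.false_eq_true, if_false]
      cases hg : (group_messages_into_thoughts_alt rest) with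
      | nil => simp [group_messages_into_thoughts_alt] at hg; simp [hg, pvConsInto]
      | cons g t => simp [group_messages_into_thoughts_alt] at hg; simp [hg, pvConsInto]

-- ===== VERDICT =====
theorem group_messages_into_thoughts_spec : Claim_equal_group_messages_into_thoughts := by
  intro messages _
  show group_messages_into_thoughts messages = group_messages_into_thoughts_alt messages
  rw [group_messages_into_thoughts, pvLoopA_eq]
  cases h : group_messages_into_thoughts_alt messages <;> simp [pvConsInto]
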